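-- pv_equiv track=rewrite | github.com/Leksa-Metropolia/Ohjelmistot1 | mod6/teht5.py | karsi
-- ===== SOURCE A (Python) =====
-- def karsi(i):
--     b = []
--     for a in i:
--         if (a % 2) == 1:
--             b.append(a)
--     for c in b:
--         i.remove(c)
--     return i
-- ===== SOURCE B (Python) =====
-- def karsi(i):
--     w = 0
--     for a in i:
--         if (a % 2) == 0:
--             i[w] = a
--             w += 1
--     del i[w:]
--     return i
-- ===== Notes on version B (the rewrite author's own statement) =====
-- stated objective: faster
-- what changed: A collects the odd elements into a second list and then deletes each with list.remove (a linear scan per odd element); B does a single in-place two-pointer compaction, writing each even element at a write index and truncating, with no removal scans.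
import Mathlib
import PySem

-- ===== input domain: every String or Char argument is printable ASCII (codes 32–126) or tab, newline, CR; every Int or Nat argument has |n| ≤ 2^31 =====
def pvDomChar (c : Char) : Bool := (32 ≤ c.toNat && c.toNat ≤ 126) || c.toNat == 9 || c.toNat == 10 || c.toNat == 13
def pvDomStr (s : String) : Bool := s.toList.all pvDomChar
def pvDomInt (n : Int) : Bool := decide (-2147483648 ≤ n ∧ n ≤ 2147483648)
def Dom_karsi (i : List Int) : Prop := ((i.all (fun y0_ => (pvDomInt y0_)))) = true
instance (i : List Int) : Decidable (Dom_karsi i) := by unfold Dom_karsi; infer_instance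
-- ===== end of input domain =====

-- B replaces A's quadratic collect-odds-then-remove-each with a single in-place two-pointer
-- compaction (same mutation of the argument list in Python; equivalence proved on return value).

-- ===== PORT A =====
def karsi (i : List Int) : List Int :=
  let b := i.foldl (fun b a => if PySem.Int.mod a 2 = 1 then b ++ [a] else b) []
  -- `i.remove(c)`: remove? never returns none here (c was taken from i); getD is a totality guard
  b.foldl (fun l c => (PySem.List.remove? l c).getD l) i

-- ===== PORT B =====
-- one step of B's loop: read i[j]; if even, write it at the write pointer w and bump w
def karsiStep (st : List Int × Nat) (j : Nat) : List Int × Nat :=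
  match st.1[j]? with
  | some a => if PySem.Int.mod a 2 = 0 then (st.1.set st.2 a, st.2 + 1) else st
  | none => st

def karsi_alt (i : List Int) : List Int :=
  let st := (List.range i.length).foldl karsiStep (i, 0)
  st.1.take st.2   -- del i[w:]

-- ===== PRECONDITION & SPEC =====
def Spec_karsi (i : List Int) (out : List Int) : Prop := out = karsi_alt i
instance (i : List Int) (out : List Int) : Decidable (Spec_karsi i out) := by unfold Spec_karsi; infer_instance

-- ===== CLAIM (what is proved, stated in full; the proofs are below) =====
def Claim_equal_karsi : Prop := ∀ (i : List Int), Dom_karsi i → Spec_karsi i (karsi i)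

-- ===== LEMMAS AND PROOFS =====

def evenB (a : Int) : Bool := decide (PySem.Int.mod a 2 = 0)

theorem pymod2_eq (a : Int) : PySem.Int.mod a 2 = a % 2 := by
  simp [PySem.Int.mod, Int.fmod_eq_emod]

theorem mod2_dichotomy (a : Int) : PySem.Int.mod a 2 = 1 ↔ ¬ (PySem.Int.mod a 2 = 0) := by
  simp only [pymod2_eq]; omega

theorem evenB_true {a : Int} (h : PySem.Int.mod a 2 = 0) : evenB a = true := by
  simp only [evenB, decide_eq_true_eq]; exact h

theorem evenB_false {a : Int} (h : ¬ PySem.Int.mod a 2 = 0) : evenB a = false := by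
  simp only [evenB, decide_eq_false_iff_not]; exact h

-- removing the elements of cs (all odd) from a::t with a even keeps a in front
theorem remove_foldl_aux (p : Int → Bool) (cs : List Int) : ∀ (t : List Int) (a : Int),
    (∀ c ∈ cs, p c = true) → p a = false →
    cs.foldl (fun l c => (PySem.List.remove? l c).getD l) (a :: t)
      = a :: cs.foldl (fun l c => (PySem.List.remove? l c).getD l) t := by
  induction cs with
  | nil => intro t a _ _; simp
  | cons c cs ih =>
    intro t a hcs ha
    have hne : a ≠ c := by
      intro h; rw [h] at ha; have := hcs c (by simp); rw [this] at ha; cases ha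
    have h1 : PySem.List.remove? (a :: t) c = (PySem.List.remove? t c).map (a :: ·) :=
      PySem.List.remove?_cons_of_ne t hne
    simp only [List.foldl_cons, h1]
    cases h : PySem.List.remove? t c with
    | none => simp [ih t a (fun c hc => hcs c (by simp [hc])) ha]
    | some r => simp [ih r a (fun c hc => hcs c (by simp [hc])) ha]

-- A's second loop: removing (filter p i) from i, one by one, yields filter (!p) i
theorem remove_foldl (p : Int → Bool) : ∀ (i : List Int),
    (i.filter p).foldl (fun l c => (PySem.List.remove? l c).getD l) i
      = i.filter (fun a => !p a) := by
  intro i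
  induction i with
  | nil => simp
  | cons a t ih =>
    by_cases hp : p a = true
    · rw [List.filter_cons_of_pos hp, List.filter_cons_of_neg (by simp [hp])]
      simp only [List.foldl_cons, PySem.List.remove?_cons_self, Option.getD_some]
      exact ih
    · have hp' : p a = false := by simpa using hp
      have hall : ∀ c ∈ t.filter p, p c = true := fun c hc => (List.mem_filter.mp hc).2
      rw [List.filter_cons_of_neg (by simp [hp']), List.filter_cons_of_pos (by simp [hp']),
        remove_foldl_aux p (t.filter p) t a hall hp', ih]

theorem karsi_eq_filter (i : List Int) :
    karsi i = i.filter evenB := by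
  unfold karsi
  rw [PySem.List.foldl_append_ite_eq_filter]
  simp only [List.nil_append]
  rw [remove_foldl]
  apply List.filter_congr
  intro a _
  by_cases h : PySem.Int.mod a 2 = 0
  · have h1 : ¬ PySem.Int.mod a 2 = 1 := by rw [mod2_dichotomy]; exact fun hc => hc h
    rw [evenB_true h, decide_eq_false h1]; rfl
  · rw [evenB_false h, decide_eq_true ((mod2_dichotomy a).mpr h)]; rfl

-- invariant of B's compaction loop after processing the first m indices
theorem karsi_alt_inv : ∀ (m : Nat) (i : List Int), m ≤ i.length →
    ((List.range m).foldl karsiStep (i, 0)).1.length = i.length ∧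
    ((List.range m).foldl karsiStep (i, 0)).2 ≤ m ∧
    ((List.range m).foldl karsiStep (i, 0)).1.drop m = i.drop m ∧
    ((List.range m).foldl karsiStep (i, 0)).1.take ((List.range m).foldl karsiStep (i, 0)).2
      = (i.take m).filter evenB := by
  intro m
  induction m with
  | zero => intro i _; simp
  | succ m ih =>
    intro i hm
    have hm' : m ≤ i.length := Nat.le_of_succ_le hm
    have hmlt : m < i.length := hm
    obtain ⟨hlen, hw, hdrop, htake⟩ := ih i hm'
    set st := (List.range m).foldl karsiStep (i, 0) with hst
    rw [List.range_succ, List.foldl_append]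
    simp only [List.foldl_cons, List.foldl_nil]
    have hget : st.1[m]? = i[m]? := by
      have h0 : (st.1.drop m)[0]? = (i.drop m)[0]? := by rw [hdrop]
      simpa [List.getElem?_drop] using h0
    have higet : i[m]? = some (i[m]'hmlt) := List.getElem?_eq_getElem hmlt
    set a := i[m]'hmlt with hadef
    have hwlt : st.2 < st.1.length := by rw [hlen]; omega
    have hwm : st.2 ≤ m := hw
    have hstep : karsiStep st m =
        if PySem.Int.mod a 2 = 0 then (st.1.set st.2 a, st.2 + 1) else st := by
      unfold karsiStep
      rw [hget, higet]
    have htakei : i.take (m + 1) = i.take m ++ [a] := by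
      rw [List.take_add_one, higet]; rfl
    by_cases he : PySem.Int.mod a 2 = 0
    · rw [hstep, if_pos he]
      refine ⟨by simp [hlen], by omega, ?_, ?_⟩
      · rw [List.drop_set]
        rw [if_pos (by omega)]
        rw [show m + 1 = m + 1 from rfl, ← List.drop_drop, ← List.drop_drop, hdrop]
      · have h1 : (st.1.set st.2 a).take (st.2 + 1)
            = st.1.take st.2 ++ [a] := by
          rw [List.take_add_one, List.take_set,
            List.set_eq_of_length_le (by simp),
            List.getElem?_set_self hwlt]
          rfl
        rw [h1, htake, htakei, List.filter_append]
        simp [evenB_true he]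
    · rw [hstep, if_neg he]
      refine ⟨hlen, by omega, ?_, ?_⟩
      · rw [← List.drop_drop, ← List.drop_drop, hdrop]
      · rw [htake, htakei, List.filter_append]
        simp [evenB_false he]

theorem karsi_alt_eq_filter (i : List Int) :
    karsi_alt i = i.filter evenB := by
  obtain ⟨_, _, _, htake⟩ := karsi_alt_inv i.length i (le_refl _)
  unfold karsi_alt
  simpa using htake

-- ===== VERDICT (by name: the statement is the Claim_ definition above) =====
theorem karsi_spec : Claim_equal_karsi := by
  intro i _
  unfold Spec_karsi
  rw [karsi_eq_filter, karsi_alt_eq_filter]
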